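-- pv_equiv track=rewrite | github.com/juanE98/auto-haaland | lambdas/common/feature_categories/team_features.py | _count_games_at_current_team
-- ===== SOURCE A (Python) =====
-- from typing import Any
--
-- def _count_games_at_current_team(
--     player_history: list[dict[str, Any]],
--     current_team_id: int,
--     fixtures_by_id: dict[int, dict[str, Any]],
-- ) -> int:
--     """
--     Count consecutive recent games played at the current team.
--
--     Walks backwards through the player's history, counting entries where the
--     fixture involved the current team. Stops at the first entry that doesn't
--     match, indicating the player was at a different team.
--
--     Args:
--         player_history: Player's gameweek history entries (chronological order)
--         current_team_id: The player's current team ID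
--         fixtures_by_id: Dict mapping fixture ID to fixture data
--
--     Returns:
--         Number of consecutive recent games at the current team
--     """
--     count = 0
--     for entry in reversed(player_history):
--         fixture = fixtures_by_id.get(entry.get("fixture", -1), {})
--         if current_team_id in (fixture.get("team_h"), fixture.get("team_a")):
--             count += 1
--         else:
--             break
--     return count
-- ===== SOURCE B (Python) =====
-- from typing import Any
--
--
-- def _count_games_at_current_team(
--     player_history: list[dict[str, Any]],
--     current_team_id: int,
--     fixtures_by_id: dict[int, dict[str, Any]],
-- ) -> int:
--     """Forward scan recording the index of the LAST entry whose fixture does not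
--     involve the current team; the trailing streak is everything after it, so the
--     answer is len(player_history) - 1 - last_bad."""
--     last_bad = -1
--     for i, entry in enumerate(player_history):
--         fixture = fixtures_by_id.get(entry.get("fixture", -1), {})
--         if current_team_id not in (fixture.get("team_h"), fixture.get("team_a")):
--             last_bad = i
--     return len(player_history) - 1 - last_bad
-- ===== Notes on version B (the rewrite author's own statement) =====
-- stated objective: alternative
-- what changed: Replaced the backward walk with break by a forward enumerate scan that records the index of the last non-matching entry and returns len - 1 - last_bad.
import Mathlib
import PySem

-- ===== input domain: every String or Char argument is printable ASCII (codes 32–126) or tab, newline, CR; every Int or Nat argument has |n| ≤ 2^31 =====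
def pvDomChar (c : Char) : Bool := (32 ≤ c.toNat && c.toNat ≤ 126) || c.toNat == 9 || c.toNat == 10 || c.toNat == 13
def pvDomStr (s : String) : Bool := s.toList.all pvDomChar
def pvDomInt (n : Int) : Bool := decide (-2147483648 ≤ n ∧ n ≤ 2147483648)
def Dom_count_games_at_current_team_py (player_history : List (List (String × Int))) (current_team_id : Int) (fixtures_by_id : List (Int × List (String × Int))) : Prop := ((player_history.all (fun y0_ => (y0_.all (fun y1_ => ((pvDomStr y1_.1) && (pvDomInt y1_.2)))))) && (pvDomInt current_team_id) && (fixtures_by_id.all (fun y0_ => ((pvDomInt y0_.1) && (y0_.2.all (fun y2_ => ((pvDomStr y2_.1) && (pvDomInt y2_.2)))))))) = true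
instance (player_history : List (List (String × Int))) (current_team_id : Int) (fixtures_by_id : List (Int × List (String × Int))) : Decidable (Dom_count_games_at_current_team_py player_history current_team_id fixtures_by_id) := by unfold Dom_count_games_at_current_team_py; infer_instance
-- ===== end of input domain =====

-- B replaces A's backward walk-with-break by a forward enumerate scan recording the index of the last non-matching entry and returning len - 1 - last_bad (alternative decomposition, same cost).

-- ===== PORT A =====
-- 'current_team_id in (fixture.get("team_h"), fixture.get("team_a"))' with .get's None default
def pvAMatch (current_team_id : Int) (fixtures_by_id : List (Int × List (String × Int))) (entry : List (String × Int)) : Bool :=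
  let fixture := (PySem.Dict.mk fixtures_by_id).getD ((PySem.Dict.mk entry).getD "fixture" (-1)) []
  ((PySem.Dict.mk fixture).get? "team_h" == some current_team_id) ||
  ((PySem.Dict.mk fixture).get? "team_a" == some current_team_id)

-- the 'for entry in reversed(player_history)' loop with its break, count as accumulator
def pvALoop (current_team_id : Int) (fixtures_by_id : List (Int × List (String × Int))) : List (List (String × Int)) → Int → Int
  | [], count => count
  | entry :: rest, count =>
      if pvAMatch current_team_id fixtures_by_id entry then
        pvALoop current_team_id fixtures_by_id rest (count + 1)
      else count

def count_games_at_current_team_py (player_history : List (List (String × Int))) (current_team_id : Int) (fixtures_by_id : List (Int × List (String × Int))) : Int :=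
  pvALoop current_team_id fixtures_by_id player_history.reverse 0

-- ===== PORT B =====
-- 'current_team_id not in (fixture.get("team_h"), fixture.get("team_a"))': tuple membership as list membership
def pvBBad (current_team_id : Int) (fixtures_by_id : List (Int × List (String × Int))) (entry : List (String × Int)) : Bool :=
  let fixture := (PySem.Dict.mk fixtures_by_id).getD ((PySem.Dict.mk entry).getD "fixture" (-1)) []
  !([(PySem.Dict.mk fixture).get? "team_h", (PySem.Dict.mk fixture).get? "team_a"].contains (some current_team_id))

def count_games_at_current_team_py_alt (player_history : List (List (String × Int))) (current_team_id : Int) (fixtures_by_id : List (Int × List (String × Int))) : Int :=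
  let last_bad : Int :=
    (PySem.List.enumerate player_history).foldl
      (fun last_bad p => if pvBBad current_team_id fixtures_by_id p.2 then p.1 else last_bad) (-1)
  (player_history.length : Int) - 1 - last_bad

-- ===== PRECONDITION & SPEC =====
def Spec_count_games_at_current_team_py (player_history : List (List (String × Int))) (current_team_id : Int) (fixtures_by_id : List (Int × List (String × Int))) (out : Int) : Prop := out = count_games_at_current_team_py_alt player_history current_team_id fixtures_by_id
instance (player_history : List (List (String × Int))) (current_team_id : Int) (fixtures_by_id : List (Int × List (String × Int))) (out : Int) : Decidable (Spec_count_games_at_current_team_py player_history current_team_id fixtures_by_id out) := by unfold Spec_count_games_at_current_team_py; infer_instance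

-- ===== CLAIM (what is proved, stated in full; the proofs are below) =====
def Claim_equal_count_games_at_current_team_py : Prop := ∀ (player_history : List (List (String × Int))) (current_team_id : Int) (fixtures_by_id : List (Int × List (String × Int))), Dom_count_games_at_current_team_py player_history current_team_id fixtures_by_id → Spec_count_games_at_current_team_py player_history current_team_id fixtures_by_id (count_games_at_current_team_py player_history current_team_id fixtures_by_id)

-- ===== LEMMAS AND PROOFS =====

-- B's "bad" test is the negation of A's match test
lemma pvBBad_eq_not_match (ct : Int) (fx : List (Int × List (String × Int))) (e : List (String × Int)) :
    pvBBad ct fx e = !pvAMatch ct fx e := by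
  unfold pvBBad pvAMatch
  rw [Bool.eq_iff_iff]
  by_cases hh : (PySem.Dict.mk ((PySem.Dict.mk fx).getD ((PySem.Dict.mk e).getD "fixture" (-1)) [])).get? "team_h" = some ct <;>
    by_cases ha : (PySem.Dict.mk ((PySem.Dict.mk fx).getD ((PySem.Dict.mk e).getD "fixture" (-1)) [])).get? "team_a" = some ct <;>
      simp_all [Ne.symm]

-- A's loop accumulator splits off additively
lemma pvALoop_acc (ct : Int) (fx : List (Int × List (String × Int))) :
    ∀ (r : List (List (String × Int))) (acc : Int),
      pvALoop ct fx r acc = acc + pvALoop ct fx r 0 := by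
  intro r
  induction r with
  | nil => intro acc; simp [pvALoop]
  | cons e rest ih =>
    intro acc
    by_cases h : pvAMatch ct fx e
    · simp only [pvALoop, h, if_true]
      rw [ih (acc + 1), ih (0 + 1)]; ring
    · simp [pvALoop, h]

-- B's forward scan over any enumeration start, as a function of the suffix
lemma pvLoops_eq (ct : Int) (fx : List (Int × List (String × Int))) :
    ∀ (l : List (List (String × Int))),
      pvALoop ct fx l.reverse 0 =
      (l.length : Int) - 1 -
        (PySem.List.enumerate l).foldl
          (fun last_bad p => if pvBBad ct fx p.2 then p.1 else last_bad) (-1) := by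
  intro l
  induction l using List.reverseRecOn with
  | nil => simp [pvALoop, PySem.List.enumerate]
  | append_singleton l e ih =>
    rw [List.reverse_append, List.reverse_singleton, List.singleton_append,
        PySem.List.enumerate_append, List.foldl_append]
    simp only [PySem.List.enumerate_cons, PySem.List.enumerate_nil, List.foldl_cons,
      List.foldl_nil, List.length_append, List.length_singleton]
    simp only [pvBBad_eq_not_match] at ih ⊢
    by_cases h : pvAMatch ct fx e
    · simp only [pvALoop, h, if_true, Bool.not_true, Bool.false_eq_true, if_false]
      rw [pvALoop_acc, ih]; push_cast; ring
    · simp only [pvALoop, h, Bool.not_false, if_true, Bool.false_eq_true, if_false]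
      push_cast; ring

-- ===== VERDICT (by name: the statement is the Claim_ definition above) =====
theorem count_games_at_current_team_py_spec : Claim_equal_count_games_at_current_team_py := by
  intro ph ct fx _
  unfold Spec_count_games_at_current_team_py count_games_at_current_team_py
    count_games_at_current_team_py_alt
  exact pvLoops_eq ct fx ph
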